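-- pv_equiv track=rewrite | github.com/dpvyt15/RRAM-FPCA | Multiplication/RRAMProgramming.py | IndiAssignPulses
-- ===== SOURCE A (Python) =====
-- def IndiAssignPulses(ArrPulse,BA):
-- 	ArrP=[[[[0 for i in range(4*len(ArrPulse[0][0][0]))] for j in range(len(ArrPulse[0][0])*9)] for k in range(len(ArrPulse[0]))] for u in range(len(ArrPulse))]
-- 	for u in range(len(ArrPulse)):
-- 		for k in range(len(ArrPulse[0])):
-- 			for i in range(len(ArrPulse[0][0])):
-- 				for j in range(len(ArrPulse[0][0][0])):
-- 					B=ArrPulse[u][k][i][j]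
-- 					for pix in range(9):
-- 						if(pix>1 and B>=0):
-- 							ArrP[u][k][9*i+pix][4*j]=BA[B+pix-2]
--
-- 						if(pix==0 and B>=0):
-- 							ArrP[u][k][9*i+pix][4*j+1]=BA[B+7]
--
-- 						if(pix>3 and B>=0):
-- 							ArrP[u][k][9*i+pix][4*j+2]=BA[B+pix-4]
-- 	for u in range(len(ArrPulse)):
-- 		for k in range(len(ArrPulse[0])):
-- 			for i in range(1,len(ArrPulse[0][0])):
-- 				for j in range(len(ArrPulse[0][0][0])):
-- 					for pix in range(9):
-- 						if(pix>3):
-- 							ArrP[u][k][9*i+pix][4*j+1]=ArrP[u][k][9*(i-1)+pix][4*j+2]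
--
-- 						if(pix>1 and j<len(ArrPulse[0][0][0])-1):
-- 							ArrP[u][k][9*i+pix][4*j+3]=ArrP[u][k][9*(i-1)+pix][4*(j+1)]
-- 	for u in range(len(ArrPulse)):
-- 		for k in range(len(ArrPulse[0])):
-- 			for i in range(len(ArrPulse[0][0])-1):
-- 				for j in range(len(ArrPulse[0][0][0])):
-- 					for pix in range(9):
-- 						if(pix==0):
-- 							ArrP[u][k][9*i+pix][4*j+2]=ArrP[u][k][9*(i+1)+pix][4*j+1]
-- 	ArrF=[[[[0 for i in range(4*len(ArrPulse[0][0][0]))] for j in range(len(ArrPulse[0][0])*9)] for k in range(len(ArrPulse[0]))] for u in range(len(ArrPulse))]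
-- 	for u in range(len(ArrPulse)):
-- 		for k in range(len(ArrPulse[0])):
-- 			for i in range(len(ArrPulse[0][0])):
-- 				for j in range(len(ArrPulse[0][0][0])):
-- 					for pix in range(9):
-- 						ArrF[u][k][9*i+pix][4*j]=ArrP[u][k][9*i+pix][4*j]
-- 						ArrF[u][k][9*i+pix][4*j+1]=ArrP[u][k][9*i+pix][4*j+1]
-- 						ArrF[u][k][9*i+pix][4*j+2]=ArrP[u][k][9*i+pix][4*j+3]
-- 						ArrF[u][k][9*i+pix][4*j+3]=ArrP[u][k][9*i+pix][4*j+2]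
--
-- 	return(ArrP)
-- ===== SOURCE B (Python) =====
-- def IndiAssignPulses(ArrPulse, BA):
--     # Single pass: compute every cell of the programming grid directly from
--     # ArrPulse and BA (the three copy-propagation passes of the original are
--     # inlined into one closed-form per cell; the discarded ArrF is dropped).
--     def cell(plane, I, J, r, c):
--         i, pix = divmod(r, 9)
--         j, q = divmod(c, 4)
--         if q == 0:
--             b = plane[i][j]
--             return BA[b + pix - 2] if pix > 1 and b >= 0 else 0
--         if q == 1:
--             if pix == 0:
--                 b = plane[i][j]
--                 return BA[b + 7] if b >= 0 else 0
--             if pix > 3 and i >= 1: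
--                 b = plane[i - 1][j]
--                 return BA[b + pix - 4] if b >= 0 else 0
--             return 0
--         if q == 2:
--             if pix == 0:
--                 if i + 1 < I:
--                     b = plane[i + 1][j]
--                     return BA[b + 7] if b >= 0 else 0
--                 return 0
--             b = plane[i][j]
--             return BA[b + pix - 4] if pix > 3 and b >= 0 else 0
--         # q == 3
--         if pix > 1 and i >= 1 and j + 1 < J:
--             b = plane[i - 1][j + 1]
--             return BA[b + pix - 2] if b >= 0 else 0
--         return 0
--
--     U = len(ArrPulse)
--     K = len(ArrPulse[0]) if U else 0
--     I = len(ArrPulse[0][0]) if K else 0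
--     J = len(ArrPulse[0][0][0]) if I else 0
--     return [[[[cell(ArrPulse[u][k], I, J, r, c) for c in range(4 * J)]
--               for r in range(I * 9)]
--              for k in range(K)]
--             for u in range(U)]
-- ===== Notes on version B (the rewrite author's own statement) =====
-- stated objective: alternative
-- what changed: Replaces A's three copy-propagation passes over a mutated grid (plus a computed-and-discarded ArrF pass) by a single pass that computes every output cell directly from ArrPulse and BA via a closed-form per-cell rule.
import Mathlib
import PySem

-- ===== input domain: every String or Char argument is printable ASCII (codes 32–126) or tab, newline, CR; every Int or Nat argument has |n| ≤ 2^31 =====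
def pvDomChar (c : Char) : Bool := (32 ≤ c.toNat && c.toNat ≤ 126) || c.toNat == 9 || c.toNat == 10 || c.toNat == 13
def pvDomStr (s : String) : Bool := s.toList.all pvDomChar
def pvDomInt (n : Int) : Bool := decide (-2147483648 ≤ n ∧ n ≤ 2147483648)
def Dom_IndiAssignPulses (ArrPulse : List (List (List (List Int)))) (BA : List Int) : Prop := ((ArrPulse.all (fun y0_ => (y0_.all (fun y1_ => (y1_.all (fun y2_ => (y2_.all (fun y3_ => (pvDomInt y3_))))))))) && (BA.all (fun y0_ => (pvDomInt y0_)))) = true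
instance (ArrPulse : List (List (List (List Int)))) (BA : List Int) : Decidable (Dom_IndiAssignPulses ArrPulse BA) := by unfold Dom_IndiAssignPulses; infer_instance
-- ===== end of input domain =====

-- B recomputes each grid cell in ONE pass by a closed-form rule instead of A's three
-- copy-propagation passes over a mutated grid; A's computed-and-discarded ArrF pass
-- (dead code: it never affects the returned ArrP) is dropped.

-- shared tiny read/write helpers (arr[u][k][r][c] access / assignment, BA[x] lookup):
-- out-of-range reads return a default; Pre_ excludes the inputs where Python raises.
def pvGt (g : List (List (List (List Int)))) (p : Nat × Nat × Nat × Nat) : Int :=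
  ((((g.getD p.1 []).getD p.2.1 []).getD p.2.2.1 []).getD p.2.2.2 0)

def pvUpd (g : List (List (List (List Int)))) (p : Nat × Nat × Nat × Nat) (v : Int) :
    List (List (List (List Int))) :=
  g.set p.1 ((g.getD p.1 []).set p.2.1
    (((g.getD p.1 []).getD p.2.1 []).set p.2.2.1
      ((((g.getD p.1 []).getD p.2.1 []).getD p.2.2.1 []).set p.2.2.2 v)))

def pvBAget (BA : List Int) (x : Int) : Int := BA.getD x.toNat 0

def pvPulse (Ap : List (List (List (List Int)))) (u k i j : Nat) : Int :=
  (((Ap.getD u []).getD k []).getD i []).getD j 0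

def pvK (Ap : List (List (List (List Int)))) : Nat := (Ap.getD 0 []).length
def pvI (Ap : List (List (List (List Int)))) : Nat := ((Ap.getD 0 []).getD 0 []).length
def pvJ (Ap : List (List (List (List Int)))) : Nat := (((Ap.getD 0 []).getD 0 []).getD 0 []).length

-- ===== PORT A =====
-- literal transliteration of A: zero grid, then the three in-place passes, one def per
-- loop nest (the trailing ArrF block of A is computed and discarded in Python — no
-- effect on the returned ArrP — so it is omitted here).
def pvPass1 (Ap : List (List (List (List Int)))) (BA : List Int) (g0 : List (List (List (List Int)))) :
    List (List (List (List Int))) :=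
  (List.range Ap.length).foldl (fun g u => (List.range (pvK Ap)).foldl (fun g k =>
    (List.range (pvI Ap)).foldl (fun g i => (List.range (pvJ Ap)).foldl (fun g j =>
      (List.range 9).foldl (fun g pix =>
        let B := pvPulse Ap u k i j
        let g := if 1 < pix ∧ 0 ≤ B then pvUpd g (u, k, 9*i+pix, 4*j) (pvBAget BA (B + pix - 2)) else g
        let g := if pix = 0 ∧ 0 ≤ B then pvUpd g (u, k, 9*i+pix, 4*j+1) (pvBAget BA (B + 7)) else g
        if 3 < pix ∧ 0 ≤ B then pvUpd g (u, k, 9*i+pix, 4*j+2) (pvBAget BA (B + pix - 4)) else g) g) g) g) g) g0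

def pvPass2 (Ap : List (List (List (List Int)))) (g0 : List (List (List (List Int)))) :
    List (List (List (List Int))) :=
  (List.range Ap.length).foldl (fun g u => (List.range (pvK Ap)).foldl (fun g k =>
    (List.range' 1 (pvI Ap - 1)).foldl (fun g i => (List.range (pvJ Ap)).foldl (fun g j =>
      (List.range 9).foldl (fun g pix =>
        let g := if 3 < pix then pvUpd g (u, k, 9*i+pix, 4*j+1) (pvGt g (u, k, 9*(i-1)+pix, 4*j+2)) else g
        if 1 < pix ∧ j < pvJ Ap - 1 then pvUpd g (u, k, 9*i+pix, 4*j+3) (pvGt g (u, k, 9*(i-1)+pix, 4*(j+1))) else g) g) g) g) g) g0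

def pvPass3 (Ap : List (List (List (List Int)))) (g0 : List (List (List (List Int)))) :
    List (List (List (List Int))) :=
  (List.range Ap.length).foldl (fun g u => (List.range (pvK Ap)).foldl (fun g k =>
    (List.range (pvI Ap - 1)).foldl (fun g i => (List.range (pvJ Ap)).foldl (fun g j =>
      (List.range 9).foldl (fun g pix =>
        if pix = 0 then pvUpd g (u, k, 9*i+pix, 4*j+2) (pvGt g (u, k, 9*(i+1)+pix, 4*j+1)) else g) g) g) g) g) g0

def IndiAssignPulses (ArrPulse : List (List (List (List Int)))) (BA : List Int) : List (List (List (List Int))) :=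
  let ArrP0 := List.replicate ArrPulse.length (List.replicate (pvK ArrPulse)
    (List.replicate (pvI ArrPulse * 9) (List.replicate (4 * pvJ ArrPulse) (0:Int))))
  pvPass3 ArrPulse (pvPass2 ArrPulse (pvPass1 ArrPulse BA ArrP0))

-- ===== PORT B =====
-- literal transliteration of Source B: one closed-form cell function, grid built by maps.
def pvCellAlt (plane : List (List Int)) (BA : List Int) (I J : Nat) (r c : Nat) : Int :=
  let i := r / 9
  let pix := r % 9
  let j := c / 4
  let q := c % 4
  if q = 0 then
    let b := (plane.getD i []).getD j 0
    if 1 < pix ∧ 0 ≤ b then pvBAget BA (b + pix - 2) else 0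
  else if q = 1 then
    if pix = 0 then
      let b := (plane.getD i []).getD j 0
      if 0 ≤ b then pvBAget BA (b + 7) else 0
    else if 3 < pix ∧ 1 ≤ i then
      let b := (plane.getD (i-1) []).getD j 0
      if 0 ≤ b then pvBAget BA (b + pix - 4) else 0
    else 0
  else if q = 2 then
    if pix = 0 then
      if i + 1 < I then
        let b := (plane.getD (i+1) []).getD j 0
        if 0 ≤ b then pvBAget BA (b + 7) else 0
      else 0
    else
      let b := (plane.getD i []).getD j 0
      if 3 < pix ∧ 0 ≤ b then pvBAget BA (b + pix - 4) else 0
  else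
    if 1 < pix ∧ 1 ≤ i ∧ j + 1 < J then
      let b := (plane.getD (i-1) []).getD (j+1) 0
      if 0 ≤ b then pvBAget BA (b + pix - 2) else 0
    else 0

def IndiAssignPulses_alt (ArrPulse : List (List (List (List Int)))) (BA : List Int) : List (List (List (List Int))) :=
  let K := pvK ArrPulse
  let I := pvI ArrPulse
  let J := pvJ ArrPulse
  (List.range ArrPulse.length).map (fun u => (List.range K).map (fun k =>
    (List.range (I*9)).map (fun r => (List.range (4*J)).map (fun c =>
      pvCellAlt ((ArrPulse.getD u []).getD k []) BA I J r c))))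

-- ===== PRECONDITION & SPEC =====
-- Pre_ excludes exactly the inputs on which the Python A raises IndexError: when both
-- inner dimensions I and J are nonzero (otherwise nothing is ever indexed), inner lists
-- shorter than the dimensions taken from the first elements (ragged input), and a
-- nonnegative pulse b whose BA lookup b+7 is out of range (b + 8 > len(BA)).
def Pre_IndiAssignPulses (ArrPulse : List (List (List (List Int)))) (BA : List Int) : Prop :=
  pvI ArrPulse = 0 ∨ pvJ ArrPulse = 0 ∨
  ∀ p ∈ ArrPulse, pvK ArrPulse ≤ p.length ∧
    ∀ q ∈ p.take (pvK ArrPulse), pvI ArrPulse ≤ q.length ∧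
      ∀ row ∈ q.take (pvI ArrPulse), pvJ ArrPulse ≤ row.length ∧
        ∀ b ∈ row.take (pvJ ArrPulse), b < 0 ∨ b + 8 ≤ (BA.length : Int)

instance (ArrPulse : List (List (List (List Int)))) (BA : List Int) : Decidable (Pre_IndiAssignPulses ArrPulse BA) := by
  unfold Pre_IndiAssignPulses; infer_instance

def pvWitness_IndiAssignPulses : List (List (List (List Int))) × List Int :=
  ([[[[0, -1], [2, 1]]]], [10, 11, 12, 13, 14, 15, 16, 17, 18, 19])

def Spec_IndiAssignPulses (ArrPulse : List (List (List (List Int)))) (BA : List Int) (out : List (List (List (List Int)))) : Prop := out = IndiAssignPulses_alt ArrPulse BA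
instance (ArrPulse : List (List (List (List Int)))) (BA : List Int) (out : List (List (List (List Int)))) : Decidable (Spec_IndiAssignPulses ArrPulse BA out) := by unfold Spec_IndiAssignPulses; infer_instance

-- ===== CLAIM (what is proved, stated in full; the proofs are below) =====
def Claim_equal_IndiAssignPulses : Prop := ∀ (ArrPulse : List (List (List (List Int)))) (BA : List Int), Dom_IndiAssignPulses ArrPulse BA → Pre_IndiAssignPulses ArrPulse BA → Spec_IndiAssignPulses ArrPulse BA (IndiAssignPulses ArrPulse BA)

-- ===== LEMMAS AND PROOFS =====

-- in-bounds predicate for a 4-index position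
def pvInD (g : List (List (List (List Int)))) (p : Nat × Nat × Nat × Nat) : Prop :=
  p.1 < g.length ∧ p.2.1 < (g.getD p.1 []).length ∧
  p.2.2.1 < ((g.getD p.1 []).getD p.2.1 []).length ∧
  p.2.2.2 < (((g.getD p.1 []).getD p.2.1 []).getD p.2.2.1 []).length

-- uniform-shape predicate
def pvDims (g : List (List (List (List Int)))) (U K R C : Nat) : Prop :=
  g.length = U ∧ ∀ a ∈ g, a.length = K ∧ ∀ b ∈ a, b.length = R ∧ ∀ c ∈ b, c.length = C

def pvApply (g : List (List (List (List Int)))) (ws : List ((Nat × Nat × Nat × Nat) × Int)) :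
    List (List (List (List Int))) :=
  ws.foldl (fun g w => pvUpd g w.1 w.2) g

lemma pvGt_upd_ne (g : List (List (List (List Int)))) (p q : Nat × Nat × Nat × Nat) (v : Int)
    (h : q ≠ p) : pvGt (pvUpd g p v) q = pvGt g q := by
  obtain ⟨u,k,r,c⟩ := p; obtain ⟨a,b,x,y⟩ := q
  simp only [pvGt, pvUpd]
  by_cases h1 : u = a <;> by_cases h2 : k = b <;> by_cases h3 : r = x <;> by_cases h4 : c = y
  all_goals simp_all [List.getElem?_set]
  all_goals (repeat (split_ifs <;> simp_all [List.getElem?_set]))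

lemma pvGt_upd_self (g : List (List (List (List Int)))) (p : Nat × Nat × Nat × Nat) (v : Int)
    (h : pvInD g p) : pvGt (pvUpd g p v) p = v := by
  obtain ⟨u,k,r,c⟩ := p
  obtain ⟨h1,h2,h3,h4⟩ := h
  simp_all [pvGt, pvUpd, List.getD_eq_getElem?_getD]

lemma pvDims_upd (g : List (List (List (List Int)))) (p : Nat × Nat × Nat × Nat) (v : Int)
    {U K R C : Nat} (h : pvDims g U K R C) : pvDims (pvUpd g p v) U K R C := by
  obtain ⟨u,k,r,c⟩ := p
  obtain ⟨hl, hm⟩ := h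
  by_cases hu : u < g.length
  case neg =>
    simp only [pvUpd]
    rw [List.set_eq_of_length_le (by omega)]
    exact ⟨hl, hm⟩
  case pos =>
    have hg : g.getD u [] ∈ g := by
      rw [List.getD_eq_getElem _ _ hu]; exact List.getElem_mem _
    obtain ⟨hK, hm2⟩ := hm _ hg
    refine ⟨by simpa [pvUpd] using hl, ?_⟩
    intro a ha
    simp only [pvUpd] at ha
    rcases List.mem_or_eq_of_mem_set ha with ha | rfl
    · exact hm a ha
    · by_cases hk : k < (g.getD u []).length
      case neg =>
        rw [List.set_eq_of_length_le (by omega)]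
        exact hm _ hg
      case pos =>
        have hg2 : (g.getD u []).getD k [] ∈ g.getD u [] := by
          rw [List.getD_eq_getElem _ _ hk]; exact List.getElem_mem _
        obtain ⟨hR, hm3⟩ := hm2 _ hg2
        refine ⟨by simpa using hK, ?_⟩
        intro b hb
        rcases List.mem_or_eq_of_mem_set hb with hb | rfl
        · exact hm2 b hb
        · by_cases hr : r < ((g.getD u []).getD k []).length
          case neg =>
            rw [List.set_eq_of_length_le (by omega)]
            exact hm2 _ hg2
          case pos =>
            have hg3 : ((g.getD u []).getD k []).getD r [] ∈ (g.getD u []).getD k [] := by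
              rw [List.getD_eq_getElem _ _ hr]; exact List.getElem_mem _
            refine ⟨by simpa using hR, ?_⟩
            intro cc hcc
            rcases List.mem_or_eq_of_mem_set hcc with hcc | rfl
            · exact hm3 cc hcc
            · simpa using hm3 _ hg3

lemma pvInD_of_dims {g : List (List (List (List Int)))} {U K R C : Nat}
    (h : pvDims g U K R C) (p : Nat × Nat × Nat × Nat)
    (h1 : p.1 < U) (h2 : p.2.1 < K) (h3 : p.2.2.1 < R) (h4 : p.2.2.2 < C) : pvInD g p := by
  obtain ⟨hl, hm⟩ := h
  obtain ⟨u,k,r,c⟩ := p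
  dsimp only at *
  have hu : u < g.length := by omega
  have hg : g.getD u [] ∈ g := by
    rw [List.getD_eq_getElem _ _ hu]; exact List.getElem_mem _
  obtain ⟨hK, hm2⟩ := hm _ hg
  have hk : k < (g.getD u []).length := by omega
  have hg2 : (g.getD u []).getD k [] ∈ g.getD u [] := by
    rw [List.getD_eq_getElem _ _ hk]; exact List.getElem_mem _
  obtain ⟨hR, hm3⟩ := hm2 _ hg2
  have hr : r < ((g.getD u []).getD k []).length := by omega
  have hg3 : ((g.getD u []).getD k []).getD r [] ∈ (g.getD u []).getD k [] := by
    rw [List.getD_eq_getElem _ _ hr]; exact List.getElem_mem _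
  have hC := hm3 _ hg3
  refine ⟨hu, hk, hr, ?_⟩
  dsimp only
  omega

lemma pvApply_append (g : List (List (List (List Int)))) (l1 l2 : List ((Nat × Nat × Nat × Nat) × Int)) :
    pvApply g (l1 ++ l2) = pvApply (pvApply g l1) l2 := by
  simp [pvApply, List.foldl_append]

lemma pvApply_dims (ws : List ((Nat × Nat × Nat × Nat) × Int)) :
    ∀ (g : List (List (List (List Int)))) {U K R C : Nat}, pvDims g U K R C →
      pvDims (pvApply g ws) U K R C := by
  induction ws with
  | nil => intro g U K R C h; exact h
  | cons w t ih => intro g U K R C h; exact ih _ (pvDims_upd _ _ _ h)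

lemma pvApply_notouch (ws : List ((Nat × Nat × Nat × Nat) × Int)) (p : Nat × Nat × Nat × Nat) :
    ∀ (g : List (List (List (List Int)))), (∀ w ∈ ws, w.1 ≠ p) →
      pvGt (pvApply g ws) p = pvGt g p := by
  induction ws with
  | nil => intro g _; rfl
  | cons w t ih =>
    intro g h
    have := ih (pvUpd g w.1 w.2) (fun w' hw' => h w' (List.mem_cons_of_mem _ hw'))
    rw [pvApply] at this ⊢
    simp only [List.foldl_cons] at this ⊢
    rw [this, pvGt_upd_ne _ _ _ _ (Ne.symm (h w List.mem_cons_self))]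

lemma pvApply_mem {U K R C : Nat} (ws : List ((Nat × Nat × Nat × Nat) × Int)) :
    ∀ (g : List (List (List (List Int)))) (w : (Nat × Nat × Nat × Nat) × Int),
      pvDims g U K R C → w ∈ ws →
      w.1.1 < U → w.1.2.1 < K → w.1.2.2.1 < R → w.1.2.2.2 < C →
      (∀ w' ∈ ws, w'.1 = w.1 → w'.2 = w.2) →
      pvGt (pvApply g ws) w.1 = w.2 := by
  induction ws with
  | nil => intro g w _ hmem; cases hmem
  | cons x t ih =>
    intro g w hd hmem hb1 hb2 hb3 hb4 huniq
    have hstep : pvApply g (x :: t) = pvApply (pvUpd g x.1 x.2) t := by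
      simp [pvApply]
    rw [hstep]
    by_cases hwt : w ∈ t
    · exact ih (pvUpd g x.1 x.2) w (pvDims_upd _ _ _ hd) hwt hb1 hb2 hb3 hb4
        (fun w' hw' => huniq w' (List.mem_cons_of_mem _ hw'))
    · have hwx : w = x := by
        rcases List.mem_cons.mp hmem with h | h
        · exact h
        · exact absurd h hwt
      subst hwx
      by_cases hex : ∃ w' ∈ t, w'.1 = w.1
      · obtain ⟨w', hw't, hw'e⟩ := hex
        have hv : w'.2 = w.2 := huniq w' (List.mem_cons_of_mem _ hw't) hw'e
        have huniq' : ∀ w'' ∈ t, w''.1 = w'.1 → w''.2 = w'.2 := by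
          intro w'' h'' he
          exact (huniq w'' (List.mem_cons_of_mem _ h'') (he.trans hw'e)).trans hv.symm
        have := ih (pvUpd g w.1 w.2) w' (pvDims_upd _ _ _ hd) hw't
          (by rw [hw'e]; exact hb1) (by rw [hw'e]; exact hb2)
          (by rw [hw'e]; exact hb3) (by rw [hw'e]; exact hb4) huniq'
        rw [hw'e] at this
        rw [this, hv]
      · push Not at hex
        rw [pvApply_notouch t w.1 _ hex]
        exact pvGt_upd_self g w.1 w.2 (pvInD_of_dims hd w.1 hb1 hb2 hb3 hb4)

-- generic loop→write-list lemma: a fold whose body writes only outside the read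
-- region R and whose write values depend on g only through R equals applying a
-- precomputed write list.
lemma pvGenfold {α : Type} (R : Nat × Nat × Nat × Nat → Prop)
    (g0 : List (List (List (List Int)))) (xs : List α)
    (f : List (List (List (List Int))) → α → List (List (List (List Int))))
    (f0 : α → List ((Nat × Nat × Nat × Nat) × Int))
    (ha : ∀ x ∈ xs, ∀ g, (∀ p, R p → pvGt g p = pvGt g0 p) → f g x = pvApply g (f0 x))
    (hb : ∀ x ∈ xs, ∀ w ∈ f0 x, ¬ R w.1) :
    ∀ g, (∀ p, R p → pvGt g p = pvGt g0 p) → xs.foldl f g = pvApply g (xs.flatMap f0) := by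
  revert ha hb
  induction xs with
  | nil => intro _ _ g _; simp [pvApply]
  | cons x t ih =>
    intro ha hb g hg
    rw [List.foldl_cons, List.flatMap_cons, pvApply_append]
    rw [ha x List.mem_cons_self g hg]
    refine ih (fun x' hx' => ha x' (List.mem_cons_of_mem _ hx'))
      (fun x' hx' => hb x' (List.mem_cons_of_mem _ hx')) _ ?_
    intro p hp
    rw [pvApply_notouch _ p _ (fun w hw he => hb x List.mem_cons_self w hw (he ▸ hp))]
    exact hg p hp

lemma pvGenfold_pure {α : Type} (xs : List α)
    (f : List (List (List (List Int))) → α → List (List (List (List Int))))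
    (f0 : α → List ((Nat × Nat × Nat × Nat) × Int))
    (ha : ∀ x ∈ xs, ∀ g, f g x = pvApply g (f0 x)) :
    ∀ g, xs.foldl f g = pvApply g (xs.flatMap f0) := by
  intro g
  exact pvGenfold (fun _ => False) g xs f f0
    (fun x hx g' _ => ha x hx g') (fun x _ w _ h => h) g (fun p h => False.elim h)

-- the write lists of the three passes
def pvW1pix (Ap : List (List (List (List Int)))) (BA : List Int) (u k i j pix : Nat) :
    List ((Nat × Nat × Nat × Nat) × Int) :=
  (if 1 < pix ∧ 0 ≤ pvPulse Ap u k i j then [((u, k, 9*i+pix, 4*j), pvBAget BA (pvPulse Ap u k i j + pix - 2))] else []) ++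
  (if pix = 0 ∧ 0 ≤ pvPulse Ap u k i j then [((u, k, 9*i+pix, 4*j+1), pvBAget BA (pvPulse Ap u k i j + 7))] else []) ++
  (if 3 < pix ∧ 0 ≤ pvPulse Ap u k i j then [((u, k, 9*i+pix, 4*j+2), pvBAget BA (pvPulse Ap u k i j + pix - 4))] else [])

def pvW1 (Ap : List (List (List (List Int)))) (BA : List Int) : List ((Nat × Nat × Nat × Nat) × Int) :=
  (List.range Ap.length).flatMap fun u => (List.range (pvK Ap)).flatMap fun k =>
    (List.range (pvI Ap)).flatMap fun i => (List.range (pvJ Ap)).flatMap fun j =>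
      (List.range 9).flatMap (pvW1pix Ap BA u k i j)

def pvP0 (Ap : List (List (List (List Int)))) : List (List (List (List Int))) :=
  List.replicate Ap.length (List.replicate (pvK Ap) (List.replicate (pvI Ap * 9) (List.replicate (4 * pvJ Ap) (0:Int))))

def pvG1 (Ap : List (List (List (List Int)))) (BA : List Int) : List (List (List (List Int))) :=
  pvApply (pvP0 Ap) (pvW1 Ap BA)

def pvW2pix (g1 : List (List (List (List Int)))) (J : Nat) (u k i j pix : Nat) :
    List ((Nat × Nat × Nat × Nat) × Int) :=
  (if 3 < pix then [((u, k, 9*i+pix, 4*j+1), pvGt g1 (u, k, 9*(i-1)+pix, 4*j+2))] else []) ++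
  (if 1 < pix ∧ j < J - 1 then [((u, k, 9*i+pix, 4*j+3), pvGt g1 (u, k, 9*(i-1)+pix, 4*(j+1)))] else [])

def pvW2 (g1 : List (List (List (List Int)))) (U K I J : Nat) : List ((Nat × Nat × Nat × Nat) × Int) :=
  (List.range U).flatMap fun u => (List.range K).flatMap fun k =>
    (List.range' 1 (I-1)).flatMap fun i => (List.range J).flatMap fun j =>
      (List.range 9).flatMap (pvW2pix g1 J u k i j)

def pvG2 (Ap : List (List (List (List Int)))) (BA : List Int) : List (List (List (List Int))) :=
  pvApply (pvG1 Ap BA) (pvW2 (pvG1 Ap BA) Ap.length (pvK Ap) (pvI Ap) (pvJ Ap))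

def pvW3pix (g2 : List (List (List (List Int)))) (u k i j pix : Nat) :
    List ((Nat × Nat × Nat × Nat) × Int) :=
  if pix = 0 then [((u, k, 9*i+pix, 4*j+2), pvGt g2 (u, k, 9*(i+1)+pix, 4*j+1))] else []

def pvW3 (g2 : List (List (List (List Int)))) (U K I J : Nat) : List ((Nat × Nat × Nat × Nat) × Int) :=
  (List.range U).flatMap fun u => (List.range K).flatMap fun k =>
    (List.range (I-1)).flatMap fun i => (List.range J).flatMap fun j =>
      (List.range 9).flatMap (pvW3pix g2 u k i j)

def pvG3 (Ap : List (List (List (List Int)))) (BA : List Int) : List (List (List (List Int))) :=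
  pvApply (pvG2 Ap BA) (pvW3 (pvG2 Ap BA) Ap.length (pvK Ap) (pvI Ap) (pvJ Ap))

-- membership characterisations of the write lists
lemma pvW1pix_mem (Ap : List (List (List (List Int)))) (BA : List Int) (u k i j pix : Nat)
    (w : (Nat × Nat × Nat × Nat) × Int) :
    w ∈ pvW1pix Ap BA u k i j pix ↔
      (1 < pix ∧ 0 ≤ pvPulse Ap u k i j ∧ w = ((u, k, 9*i+pix, 4*j), pvBAget BA (pvPulse Ap u k i j + pix - 2))) ∨
      (pix = 0 ∧ 0 ≤ pvPulse Ap u k i j ∧ w = ((u, k, 9*i+pix, 4*j+1), pvBAget BA (pvPulse Ap u k i j + 7))) ∨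
      (3 < pix ∧ 0 ≤ pvPulse Ap u k i j ∧ w = ((u, k, 9*i+pix, 4*j+2), pvBAget BA (pvPulse Ap u k i j + pix - 4))) := by
  simp [pvW1pix, List.mem_append, List.mem_ite_nil_right, and_assoc]

lemma pvW1_mem (Ap : List (List (List (List Int)))) (BA : List Int)
    (w : (Nat × Nat × Nat × Nat) × Int) :
    w ∈ pvW1 Ap BA ↔ ∃ u, u < Ap.length ∧ ∃ k, k < pvK Ap ∧ ∃ i, i < pvI Ap ∧
      ∃ j, j < pvJ Ap ∧ ∃ pix, pix < 9 ∧ w ∈ pvW1pix Ap BA u k i j pix := by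
  simp [pvW1, List.mem_flatMap, List.mem_range]

lemma pvW2pix_mem (g1 : List (List (List (List Int)))) (J u k i j pix : Nat)
    (w : (Nat × Nat × Nat × Nat) × Int) :
    w ∈ pvW2pix g1 J u k i j pix ↔
      (3 < pix ∧ w = ((u, k, 9*i+pix, 4*j+1), pvGt g1 (u, k, 9*(i-1)+pix, 4*j+2))) ∨
      (1 < pix ∧ j < J - 1 ∧ w = ((u, k, 9*i+pix, 4*j+3), pvGt g1 (u, k, 9*(i-1)+pix, 4*(j+1)))) := by
  simp [pvW2pix, List.mem_append, List.mem_ite_nil_right, and_assoc]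

lemma pvW2_mem (g1 : List (List (List (List Int)))) (U K I J : Nat)
    (w : (Nat × Nat × Nat × Nat) × Int) :
    w ∈ pvW2 g1 U K I J ↔ ∃ u, u < U ∧ ∃ k, k < K ∧ ∃ i, (1 ≤ i ∧ i < 1 + (I-1)) ∧
      ∃ j, j < J ∧ ∃ pix, pix < 9 ∧ w ∈ pvW2pix g1 J u k i j pix := by
  simp [pvW2, List.mem_flatMap, List.mem_range, List.mem_range'_1]

lemma pvW3pix_mem (g2 : List (List (List (List Int)))) (u k i j pix : Nat)
    (w : (Nat × Nat × Nat × Nat) × Int) :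
    w ∈ pvW3pix g2 u k i j pix ↔
      (pix = 0 ∧ w = ((u, k, 9*i+pix, 4*j+2), pvGt g2 (u, k, 9*(i+1)+pix, 4*j+1))) := by
  simp [pvW3pix, List.mem_ite_nil_right]

lemma pvW3_mem (g2 : List (List (List (List Int)))) (U K I J : Nat)
    (w : (Nat × Nat × Nat × Nat) × Int) :
    w ∈ pvW3 g2 U K I J ↔ ∃ u, u < U ∧ ∃ k, k < K ∧ ∃ i, i < I - 1 ∧
      ∃ j, j < J ∧ ∃ pix, pix < 9 ∧ w ∈ pvW3pix g2 u k i j pix := by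
  simp [pvW3, List.mem_flatMap, List.mem_range]

-- the three passes as write-list applications
lemma pvPass1_eq (Ap : List (List (List (List Int)))) (BA : List Int) :
    ∀ g, pvPass1 Ap BA g = pvApply g (pvW1 Ap BA) := by
  unfold pvPass1 pvW1
  refine pvGenfold_pure _ _ _ ?_
  intro u _
  refine pvGenfold_pure _ _ _ ?_
  intro k _
  refine pvGenfold_pure _ _ _ ?_
  intro i _
  refine pvGenfold_pure _ _ _ ?_
  intro j _
  refine pvGenfold_pure _ _ _ ?_
  intro pix hpix g
  have hp : pix < 9 := List.mem_range.mp hpix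
  by_cases h0 : 0 ≤ pvPulse Ap u k i j <;> interval_cases pix <;>
    simp [pvW1pix, pvApply, h0]

lemma pvPass2_eq (Ap : List (List (List (List Int)))) (g0 : List (List (List (List Int)))) :
    ∀ g, (∀ p : Nat × Nat × Nat × Nat, (p.2.2.2 % 4 = 0 ∨ p.2.2.2 % 4 = 2) → pvGt g p = pvGt g0 p) →
      pvPass2 Ap g = pvApply g (pvW2 g0 Ap.length (pvK Ap) (pvI Ap) (pvJ Ap)) := by
  unfold pvPass2 pvW2
  refine pvGenfold (fun p => p.2.2.2 % 4 = 0 ∨ p.2.2.2 % 4 = 2) g0 _ _ _ ?_ ?_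
  · intro u _
    refine pvGenfold _ g0 _ _ _ ?_ ?_
    · intro k _
      refine pvGenfold _ g0 _ _ _ ?_ ?_
      · intro i _
        refine pvGenfold _ g0 _ _ _ ?_ ?_
        · intro j _
          refine pvGenfold _ g0 _ _ _ ?_ ?_
          · intro pix _ g hg
            have e1 : pvGt g (u, k, 9*(i-1)+pix, 4*j+2) = pvGt g0 (u, k, 9*(i-1)+pix, 4*j+2) :=
              hg _ (Or.inr (show (4*j+2) % 4 = 2 by omega))
            have e0 : pvGt g (u, k, 9*(i-1)+pix, 4*(j+1)) = pvGt g0 (u, k, 9*(i-1)+pix, 4*(j+1)) :=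
              hg _ (Or.inl (show (4*(j+1)) % 4 = 0 by omega))
            have e2 : ∀ v, pvGt (pvUpd g (u, k, 9*i+pix, 4*j+1) v) (u, k, 9*(i-1)+pix, 4*(j+1)) =
                pvGt g0 (u, k, 9*(i-1)+pix, 4*(j+1)) := by
              intro v
              rw [pvGt_upd_ne _ _ _ _ (by simp [Prod.ext_iff]; omega)]
              exact e0
            by_cases h1 : 3 < pix <;> by_cases h2 : 1 < pix ∧ j < pvJ Ap - 1 <;>
              simp [pvW2pix, pvApply, h1, h2, e1, e2, e0]
          · intro pix _ w hw
            rw [pvW2pix_mem] at hw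
            rcases hw with ⟨_, rfl⟩ | ⟨_, _, rfl⟩ <;> dsimp <;> omega
        · intro j _ w hw
          simp only [List.mem_flatMap, List.mem_range] at hw
          obtain ⟨pix, _, hw⟩ := hw
          rw [pvW2pix_mem] at hw
          rcases hw with ⟨_, rfl⟩ | ⟨_, _, rfl⟩ <;> dsimp <;> omega
      · intro i _ w hw
        simp only [List.mem_flatMap, List.mem_range] at hw
        obtain ⟨j, _, pix, _, hw⟩ := hw
        rw [pvW2pix_mem] at hw
        rcases hw with ⟨_, rfl⟩ | ⟨_, _, rfl⟩ <;> dsimp <;> omega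
    · intro k _ w hw
      simp only [List.mem_flatMap, List.mem_range, List.mem_range'_1] at hw
      obtain ⟨i, _, j, _, pix, _, hw⟩ := hw
      rw [pvW2pix_mem] at hw
      rcases hw with ⟨_, rfl⟩ | ⟨_, _, rfl⟩ <;> dsimp <;> omega
  · intro u _ w hw
    simp only [List.mem_flatMap, List.mem_range, List.mem_range'_1] at hw
    obtain ⟨k, _, i, _, j, _, pix, _, hw⟩ := hw
    rw [pvW2pix_mem] at hw
    rcases hw with ⟨_, rfl⟩ | ⟨_, _, rfl⟩ <;> dsimp <;> omega

lemma pvPass3_eq (Ap : List (List (List (List Int)))) (g0 : List (List (List (List Int)))) :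
    ∀ g, (∀ p : Nat × Nat × Nat × Nat, p.2.2.2 % 4 = 1 → pvGt g p = pvGt g0 p) →
      pvPass3 Ap g = pvApply g (pvW3 g0 Ap.length (pvK Ap) (pvI Ap) (pvJ Ap)) := by
  unfold pvPass3 pvW3
  refine pvGenfold (fun p => p.2.2.2 % 4 = 1) g0 _ _ _ ?_ ?_
  · intro u _
    refine pvGenfold _ g0 _ _ _ ?_ ?_
    · intro k _
      refine pvGenfold _ g0 _ _ _ ?_ ?_
      · intro i _
        refine pvGenfold _ g0 _ _ _ ?_ ?_
        · intro j _
          refine pvGenfold _ g0 _ _ _ ?_ ?_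
          · intro pix _ g hg
            have e1 : pvGt g (u, k, 9*(i+1)+pix, 4*j+1) = pvGt g0 (u, k, 9*(i+1)+pix, 4*j+1) :=
              hg _ (show (4*j+1) % 4 = 1 by omega)
            by_cases h1 : pix = 0 <;> simp_all [pvW3pix, pvApply]
          · intro pix _ w hw
            rw [pvW3pix_mem] at hw
            obtain ⟨_, rfl⟩ := hw
            dsimp
            omega
        · intro j _ w hw
          simp only [List.mem_flatMap, List.mem_range] at hw
          obtain ⟨pix, _, hw⟩ := hw
          rw [pvW3pix_mem] at hw
          obtain ⟨_, rfl⟩ := hw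
          dsimp
          omega
      · intro i _ w hw
        simp only [List.mem_flatMap, List.mem_range] at hw
        obtain ⟨j, _, pix, _, hw⟩ := hw
        rw [pvW3pix_mem] at hw
        obtain ⟨_, rfl⟩ := hw
        dsimp
        omega
    · intro k _ w hw
      simp only [List.mem_flatMap, List.mem_range] at hw
      obtain ⟨i, _, j, _, pix, _, hw⟩ := hw
      rw [pvW3pix_mem] at hw
      obtain ⟨_, rfl⟩ := hw
      dsimp
      omega
  · intro u _ w hw
    simp only [List.mem_flatMap, List.mem_range] at hw
    obtain ⟨k, _, i, _, j, _, pix, _, hw⟩ := hw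
    rw [pvW3pix_mem] at hw
    obtain ⟨_, rfl⟩ := hw
    dsimp
    omega

lemma pvPortA_eq (Ap : List (List (List (List Int)))) (BA : List Int) :
    IndiAssignPulses Ap BA = pvG3 Ap BA := by
  have h0 : IndiAssignPulses Ap BA = pvPass3 Ap (pvPass2 Ap (pvPass1 Ap BA (pvP0 Ap))) := rfl
  rw [h0, pvPass1_eq]
  have h2 := pvPass2_eq Ap (pvG1 Ap BA) (pvApply (pvP0 Ap) (pvW1 Ap BA)) (fun p _ => rfl)
  rw [h2, show pvApply (pvP0 Ap) (pvW1 Ap BA) = pvG1 Ap BA from rfl]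
  have h3 := pvPass3_eq Ap (pvG2 Ap BA) (pvApply (pvG1 Ap BA) (pvW2 (pvG1 Ap BA) Ap.length (pvK Ap) (pvI Ap) (pvJ Ap))) (fun p _ => rfl)
  rw [h3]
  rfl

lemma pvDims_P0 (Ap : List (List (List (List Int)))) :
    pvDims (pvP0 Ap) Ap.length (pvK Ap) (pvI Ap * 9) (4 * pvJ Ap) := by
  refine ⟨by simp [pvP0], ?_⟩
  intro a ha
  rw [List.eq_of_mem_replicate ha]
  refine ⟨by simp, ?_⟩
  intro b hb
  rw [List.eq_of_mem_replicate hb]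
  refine ⟨by simp, ?_⟩
  intro c hc
  rw [List.eq_of_mem_replicate hc]
  simp

lemma pvGt_P0 (Ap : List (List (List (List Int)))) (p : Nat × Nat × Nat × Nat) :
    pvGt (pvP0 Ap) p = 0 := by
  obtain ⟨u,k,r,c⟩ := p
  simp only [pvGt, pvP0, List.getD, List.getElem?_replicate]
  repeat' split_ifs <;>
    simp only [Option.getD_some, Option.getD_none, List.getElem?_replicate, List.getElem?_nil]

-- which write (if any) each list performs at a given position
lemma pvW1_at (Ap : List (List (List (List Int)))) (BA : List Int) (u k i pix j q : Nat)
    (hp : pix < 9) (hq : q < 4) :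
    ∀ w ∈ pvW1 Ap BA, w.1 = (u, k, 9*i+pix, 4*j+q) →
      (q = 0 ∧ 1 < pix ∧ 0 ≤ pvPulse Ap u k i j ∧ w.2 = pvBAget BA (pvPulse Ap u k i j + pix - 2)) ∨
      (q = 1 ∧ pix = 0 ∧ 0 ≤ pvPulse Ap u k i j ∧ w.2 = pvBAget BA (pvPulse Ap u k i j + 7)) ∨
      (q = 2 ∧ 3 < pix ∧ 0 ≤ pvPulse Ap u k i j ∧ w.2 = pvBAget BA (pvPulse Ap u k i j + pix - 4)) := by
  intro w hw he
  rw [pvW1_mem] at hw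
  obtain ⟨u', hu', k', hk', i', hi', j', hj', pix', hp', hw⟩ := hw
  rw [pvW1pix_mem] at hw
  rcases hw with ⟨ha, hb, rfl⟩ | ⟨ha, hb, rfl⟩ | ⟨ha, hb, rfl⟩ <;>
      simp only [Prod.mk.injEq] at he <;>
      obtain ⟨h1, h2, h3, h4⟩ := he
  · have hq0 : q = 0 := by omega
    have hii : i' = i := by omega
    have hpp : pix' = pix := by omega
    have hjj : j' = j := by omega
    subst h1; subst h2; subst hii; subst hpp; subst hjj
    exact Or.inl ⟨hq0, ha, hb, rfl⟩
  · have hq1 : q = 1 := by omega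
    have hii : i' = i := by omega
    have hpp : pix' = pix := by omega
    have hjj : j' = j := by omega
    subst h1; subst h2; subst hii; subst hpp; subst hjj
    exact Or.inr (Or.inl ⟨hq1, by omega, hb, rfl⟩)
  · have hq2 : q = 2 := by omega
    have hii : i' = i := by omega
    have hpp : pix' = pix := by omega
    have hjj : j' = j := by omega
    subst h1; subst h2; subst hii; subst hpp; subst hjj
    exact Or.inr (Or.inr ⟨hq2, ha, hb, rfl⟩)

lemma pvW2_at (g1 : List (List (List (List Int)))) (U K I J : Nat) (u k i pix j q : Nat)
    (hp : pix < 9) (hq : q < 4) :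
    ∀ w ∈ pvW2 g1 U K I J, w.1 = (u, k, 9*i+pix, 4*j+q) →
      (q = 1 ∧ 3 < pix ∧ 1 ≤ i ∧ i < I ∧ j < J ∧ w.2 = pvGt g1 (u, k, 9*(i-1)+pix, 4*j+2)) ∨
      (q = 3 ∧ 1 < pix ∧ 1 ≤ i ∧ i < I ∧ j < J - 1 ∧ w.2 = pvGt g1 (u, k, 9*(i-1)+pix, 4*(j+1))) := by
  intro w hw he
  rw [pvW2_mem] at hw
  obtain ⟨u', hu', k', hk', i', hi', j', hj', pix', hp', hw⟩ := hw
  rw [pvW2pix_mem] at hw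
  rcases hw with ⟨ha, rfl⟩ | ⟨ha, hb, rfl⟩ <;>
      simp only [Prod.mk.injEq] at he <;>
      obtain ⟨h1, h2, h3, h4⟩ := he
  · have hq1 : q = 1 := by omega
    have hii : i' = i := by omega
    have hpp : pix' = pix := by omega
    have hjj : j' = j := by omega
    subst h1; subst h2; subst hii; subst hpp; subst hjj
    exact Or.inl ⟨hq1, ha, by omega, by omega, hj', rfl⟩
  · have hq3 : q = 3 := by omega
    have hii : i' = i := by omega
    have hpp : pix' = pix := by omega
    have hjj : j' = j := by omega
    subst h1; subst h2; subst hii; subst hpp; subst hjj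
    exact Or.inr ⟨hq3, ha, by omega, by omega, hb, rfl⟩

lemma pvW3_at (g2 : List (List (List (List Int)))) (U K I J : Nat) (u k i pix j q : Nat)
    (hp : pix < 9) (hq : q < 4) :
    ∀ w ∈ pvW3 g2 U K I J, w.1 = (u, k, 9*i+pix, 4*j+q) →
      (q = 2 ∧ pix = 0 ∧ i < I - 1 ∧ j < J ∧ w.2 = pvGt g2 (u, k, 9*(i+1)+pix, 4*j+1)) := by
  intro w hw he
  rw [pvW3_mem] at hw
  obtain ⟨u', hu', k', hk', i', hi', j', hj', pix', hp', hw⟩ := hw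
  rw [pvW3pix_mem] at hw
  obtain ⟨ha, rfl⟩ := hw
  simp only [Prod.mk.injEq] at he
  obtain ⟨h1, h2, h3, h4⟩ := he
  have hq2 : q = 2 := by omega
  have hii : i' = i := by omega
  have hpp : pix' = pix := by omega
  have hjj : j' = j := by omega
  subst h1; subst h2; subst hii; subst hpp; subst hjj
  exact ⟨hq2, by omega, by omega, hj', rfl⟩

lemma pvDims_G1 (Ap : List (List (List (List Int)))) (BA : List Int) :
    pvDims (pvG1 Ap BA) Ap.length (pvK Ap) (pvI Ap * 9) (4 * pvJ Ap) :=
  pvApply_dims _ _ (pvDims_P0 Ap)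

lemma pvDims_G2 (Ap : List (List (List (List Int)))) (BA : List Int) :
    pvDims (pvG2 Ap BA) Ap.length (pvK Ap) (pvI Ap * 9) (4 * pvJ Ap) :=
  pvApply_dims _ _ (pvDims_G1 Ap BA)

lemma pvDims_G3 (Ap : List (List (List (List Int)))) (BA : List Int) :
    pvDims (pvG3 Ap BA) Ap.length (pvK Ap) (pvI Ap * 9) (4 * pvJ Ap) :=
  pvApply_dims _ _ (pvDims_G2 Ap BA)

-- value of pass 1 at an in-range position
def pvV1 (Ap : List (List (List (List Int)))) (BA : List Int) (u k i pix j q : Nat) : Int :=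
  let B := pvPulse Ap u k i j
  if q = 0 then (if 1 < pix ∧ 0 ≤ B then pvBAget BA (B + pix - 2) else 0)
  else if q = 1 then (if pix = 0 ∧ 0 ≤ B then pvBAget BA (B + 7) else 0)
  else if q = 2 then (if 3 < pix ∧ 0 ≤ B then pvBAget BA (B + pix - 4) else 0)
  else 0

lemma pvG1_char (Ap : List (List (List (List Int)))) (BA : List Int) (u k i pix j q : Nat)
    (hu : u < Ap.length) (hk : k < pvK Ap) (hi : i < pvI Ap) (hp : pix < 9)
    (hj : j < pvJ Ap) (hq : q < 4) :
    pvGt (pvG1 Ap BA) (u, k, 9*i+pix, 4*j+q) = pvV1 Ap BA u k i pix j q := by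
  have hd := pvDims_P0 Ap
  have hb1 : u < Ap.length := hu
  have hb3 : 9*i+pix < pvI Ap * 9 := by omega
  have hb4 : ∀ q', q' < 4 → 4*j+q' < 4 * pvJ Ap := by omega
  interval_cases q
  · by_cases hc : 1 < pix ∧ 0 ≤ pvPulse Ap u k i j
    · have hmem : ((u, k, 9*i+pix, 4*j), pvBAget BA (pvPulse Ap u k i j + pix - 2)) ∈ pvW1 Ap BA := by
        rw [pvW1_mem]
        refine ⟨u, hu, k, hk, i, hi, j, hj, pix, hp, ?_⟩
        rw [pvW1pix_mem]
        exact Or.inl ⟨hc.1, hc.2, rfl⟩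
      have := pvApply_mem (pvW1 Ap BA) (pvP0 Ap) _ hd hmem hb1 hk hb3 (by simpa using hb4 0 (by omega))
        (by
          intro w' hw' he
          rcases pvW1_at Ap BA u k i pix j 0 hp (by omega) w' hw' (by simpa using he) with
            ⟨_, _, _, hv⟩ | ⟨_, h0, _, _⟩ | ⟨h2, _, _, _⟩
          · exact hv
          · omega
          · omega)
      dsimp only at this
      simp only [Nat.add_zero]
      rw [pvG1, this]
      simp [pvV1, hc]
    · rw [pvG1, pvApply_notouch _ _ _ (by
        intro w hw he
        rcases pvW1_at Ap BA u k i pix j 0 hp (by omega) w hw he with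
          ⟨_, ha, hb, _⟩ | ⟨_, h0, _, _⟩ | ⟨h2, _, _, _⟩
        · exact hc ⟨ha, hb⟩
        · omega
        · omega), pvGt_P0]
      simp [pvV1, hc]
  · by_cases hc : pix = 0 ∧ 0 ≤ pvPulse Ap u k i j
    · have hmem : ((u, k, 9*i+pix, 4*j+1), pvBAget BA (pvPulse Ap u k i j + 7)) ∈ pvW1 Ap BA := by
        rw [pvW1_mem]
        refine ⟨u, hu, k, hk, i, hi, j, hj, pix, hp, ?_⟩
        rw [pvW1pix_mem]
        exact Or.inr (Or.inl ⟨hc.1, hc.2, rfl⟩)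
      have := pvApply_mem (pvW1 Ap BA) (pvP0 Ap) _ hd hmem hb1 hk hb3 (hb4 1 (by omega))
        (by
          intro w' hw' he
          rcases pvW1_at Ap BA u k i pix j 1 hp (by omega) w' hw' he with
            ⟨h0, _, _, _⟩ | ⟨_, _, _, hv⟩ | ⟨h2, _, _, _⟩
          · omega
          · exact hv
          · omega)
      dsimp only at this
      rw [pvG1, this]
      simp [pvV1, hc]
    · rw [pvG1, pvApply_notouch _ _ _ (by
        intro w hw he
        rcases pvW1_at Ap BA u k i pix j 1 hp (by omega) w hw he with
          ⟨h0, _, _, _⟩ | ⟨_, ha, hb, _⟩ | ⟨h2, _, _, _⟩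
        · omega
        · exact hc ⟨ha, hb⟩
        · omega), pvGt_P0]
      simp [pvV1, hc]
  · by_cases hc : 3 < pix ∧ 0 ≤ pvPulse Ap u k i j
    · have hmem : ((u, k, 9*i+pix, 4*j+2), pvBAget BA (pvPulse Ap u k i j + pix - 4)) ∈ pvW1 Ap BA := by
        rw [pvW1_mem]
        refine ⟨u, hu, k, hk, i, hi, j, hj, pix, hp, ?_⟩
        rw [pvW1pix_mem]
        exact Or.inr (Or.inr ⟨hc.1, hc.2, rfl⟩)
      have := pvApply_mem (pvW1 Ap BA) (pvP0 Ap) _ hd hmem hb1 hk hb3 (hb4 2 (by omega))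
        (by
          intro w' hw' he
          rcases pvW1_at Ap BA u k i pix j 2 hp (by omega) w' hw' he with
            ⟨h0, _, _, _⟩ | ⟨h1, _, _, _⟩ | ⟨_, _, _, hv⟩
          · omega
          · omega
          · exact hv)
      dsimp only at this
      rw [pvG1, this]
      simp [pvV1, hc]
    · rw [pvG1, pvApply_notouch _ _ _ (by
        intro w hw he
        rcases pvW1_at Ap BA u k i pix j 2 hp (by omega) w hw he with
          ⟨h0, _, _, _⟩ | ⟨h1, _, _, _⟩ | ⟨_, ha, hb, _⟩
        · omega
        · omega
        · exact hc ⟨ha, hb⟩), pvGt_P0]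
      simp [pvV1, hc]
  · rw [pvG1, pvApply_notouch _ _ _ (by
      intro w hw he
      rcases pvW1_at Ap BA u k i pix j 3 hp (by omega) w hw he with
        ⟨h0, _, _, _⟩ | ⟨h1, _, _, _⟩ | ⟨h2, _, _, _⟩ <;> omega), pvGt_P0]
    simp [pvV1]

lemma pvG2_char_read (Ap : List (List (List (List Int)))) (BA : List Int) (u k i j : Nat)
    (hu : u < Ap.length) (hk : k < pvK Ap) (hi : i < pvI Ap) (hj : j < pvJ Ap) :
    pvGt (pvG2 Ap BA) (u, k, 9*i, 4*j+1) =
      (if 0 ≤ pvPulse Ap u k i j then pvBAget BA (pvPulse Ap u k i j + 7) else 0) := by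
  rw [pvG2, pvApply_notouch _ _ _ (by
    intro w hw he
    rcases pvW2_at (pvG1 Ap BA) Ap.length (pvK Ap) (pvI Ap) (pvJ Ap) u k i 0 j 1
        (by omega) (by omega) w hw (by simpa using he) with
      ⟨_, h3, _⟩ | ⟨hq3, _⟩
    · omega
    · omega)]
  have h := pvG1_char Ap BA u k i 0 j 1 hu hk hi (by omega) hj (by omega)
  simp only [Nat.add_zero] at h
  rw [h]
  simp [pvV1]

lemma pvG3_char (Ap : List (List (List (List Int)))) (BA : List Int) (u k i pix j q : Nat)
    (hu : u < Ap.length) (hk : k < pvK Ap) (hi : i < pvI Ap) (hp : pix < 9)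
    (hj : j < pvJ Ap) (hq : q < 4) :
    pvGt (pvG3 Ap BA) (u, k, 9*i+pix, 4*j+q) =
      pvCellAlt ((Ap.getD u []).getD k []) BA (pvI Ap) (pvJ Ap) (9*i+pix) (4*j+q) := by
  have e1 : (9*i+pix)/9 = i := by omega
  have e2 : (9*i+pix)%9 = pix := by omega
  have e3 : ∀ q', q' < 4 → (4*j+q')/4 = j := by omega
  have e4 : ∀ q', q' < 4 → (4*j+q')%4 = q' := by omega
  interval_cases q
  · -- q = 0 : pass-1 value survives
    rw [pvG3, pvApply_notouch _ _ _ (by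
      intro w hw he
      rcases pvW3_at (pvG2 Ap BA) Ap.length (pvK Ap) (pvI Ap) (pvJ Ap) u k i pix j 0 hp
        (by omega) w hw he with ⟨hq2, _⟩
      omega)]
    rw [pvG2, pvApply_notouch _ _ _ (by
      intro w hw he
      rcases pvW2_at (pvG1 Ap BA) Ap.length (pvK Ap) (pvI Ap) (pvJ Ap) u k i pix j 0 hp
        (by omega) w hw he with ⟨hq1, _⟩ | ⟨hq3, _⟩ <;> omega)]
    rw [pvG1_char Ap BA u k i pix j 0 hu hk hi hp hj (by omega)]
    simp [pvV1, pvCellAlt, e1, e2, e3 0 (by omega), e4 0 (by omega), pvPulse]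
  · -- q = 1
    rw [pvG3, pvApply_notouch _ _ _ (by
      intro w hw he
      rcases pvW3_at (pvG2 Ap BA) Ap.length (pvK Ap) (pvI Ap) (pvJ Ap) u k i pix j 1 hp
        (by omega) w hw he with ⟨hq2, _⟩
      omega)]
    by_cases hcw : 3 < pix ∧ 1 ≤ i
    · -- copied from the cell below-left in pass 2
      have hmem : ((u, k, 9*i+pix, 4*j+1), pvGt (pvG1 Ap BA) (u, k, 9*(i-1)+pix, 4*j+2)) ∈
          pvW2 (pvG1 Ap BA) Ap.length (pvK Ap) (pvI Ap) (pvJ Ap) := by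
        rw [pvW2_mem]
        refine ⟨u, hu, k, hk, i, ⟨hcw.2, by omega⟩, j, hj, pix, hp, ?_⟩
        rw [pvW2pix_mem]
        exact Or.inl ⟨hcw.1, rfl⟩
      have hv := pvApply_mem (pvW2 (pvG1 Ap BA) Ap.length (pvK Ap) (pvI Ap) (pvJ Ap))
        (pvG1 Ap BA) _ (pvDims_G1 Ap BA) hmem hu hk (by dsimp; omega) (by dsimp; omega)
        (by
          intro w' hw' he
          rcases pvW2_at (pvG1 Ap BA) Ap.length (pvK Ap) (pvI Ap) (pvJ Ap) u k i pix j 1 hp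
            (by omega) w' hw' (by simpa using he) with ⟨_, _, _, _, _, hv⟩ | ⟨hq3, _⟩
          · exact hv
          · omega)
      dsimp only at hv
      rw [pvG2, hv]
      have h1 := pvG1_char Ap BA u k (i-1) pix j 2 hu hk (by omega) hp hj (by omega)
      rw [h1]
      have hpix0 : ¬ pix = 0 := by omega
      simp [pvV1, pvCellAlt, e1, e2, e3 1 (by omega), e4 1 (by omega), pvPulse, hcw, hcw.1, hpix0]
    · by_cases hc0 : pix = 0
      · -- pass-1 kind-2 value survives
        rw [pvG2, pvApply_notouch _ _ _ (by
          intro w hw he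
          rcases pvW2_at (pvG1 Ap BA) Ap.length (pvK Ap) (pvI Ap) (pvJ Ap) u k i pix j 1 hp
            (by omega) w hw he with ⟨_, h3, _⟩ | ⟨hq3, _⟩ <;> omega)]
        rw [pvG1_char Ap BA u k i pix j 1 hu hk hi hp hj (by omega)]
        simp [pvV1, pvCellAlt, e1, e2, e3 1 (by omega), e4 1 (by omega), pvPulse, hc0]
      · -- untouched, zero
        rw [pvG2, pvApply_notouch _ _ _ (by
          intro w hw he
          rcases pvW2_at (pvG1 Ap BA) Ap.length (pvK Ap) (pvI Ap) (pvJ Ap) u k i pix j 1 hp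
            (by omega) w hw he with ⟨_, h3, hi1, _⟩ | ⟨hq3, _⟩ <;> omega)]
        rw [pvG1_char Ap BA u k i pix j 1 hu hk hi hp hj (by omega)]
        simp [pvV1, pvCellAlt, e1, e2, e3 1 (by omega), e4 1 (by omega), pvPulse, hc0, hcw]
  · -- q = 2
    by_cases hc0 : pix = 0
    · subst hc0
      by_cases hci : i + 1 < pvI Ap
      · -- copied from the cell above in pass 3
        have hmem : ((u, k, 9*i+0, 4*j+2), pvGt (pvG2 Ap BA) (u, k, 9*(i+1)+0, 4*j+1)) ∈
            pvW3 (pvG2 Ap BA) Ap.length (pvK Ap) (pvI Ap) (pvJ Ap) := by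
          rw [pvW3_mem]
          refine ⟨u, hu, k, hk, i, by omega, j, hj, 0, by omega, ?_⟩
          rw [pvW3pix_mem]
          exact ⟨rfl, rfl⟩
        have hv := pvApply_mem (pvW3 (pvG2 Ap BA) Ap.length (pvK Ap) (pvI Ap) (pvJ Ap))
          (pvG2 Ap BA) _ (pvDims_G2 Ap BA) hmem hu hk (by dsimp; omega) (by dsimp; omega)
          (by
            intro w' hw' he
            rcases pvW3_at (pvG2 Ap BA) Ap.length (pvK Ap) (pvI Ap) (pvJ Ap) u k i 0 j 2
              (by omega) (by omega) w' hw' (by simpa using he) with ⟨_, _, _, _, hv⟩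
            exact hv)
        dsimp only at hv
        rw [pvG3, hv]
        have h2 := pvG2_char_read Ap BA u k (i+1) j hu hk (by omega) hj
        simp only [Nat.add_zero]
        rw [h2]
        simp [pvCellAlt, e1, e2, e3 2 (by omega), e4 2 (by omega), pvPulse, hci]
      · -- bottom row: stays zero
        rw [pvG3, pvApply_notouch _ _ _ (by
          intro w hw he
          rcases pvW3_at (pvG2 Ap BA) Ap.length (pvK Ap) (pvI Ap) (pvJ Ap) u k i 0 j 2
            (by omega) (by omega) w hw he with ⟨_, _, hiI, _⟩
          omega)]
        rw [pvG2, pvApply_notouch _ _ _ (by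
          intro w hw he
          rcases pvW2_at (pvG1 Ap BA) Ap.length (pvK Ap) (pvI Ap) (pvJ Ap) u k i 0 j 2
            (by omega) (by omega) w hw he with ⟨hq1, _⟩ | ⟨hq3, _⟩ <;> omega)]
        rw [pvG1_char Ap BA u k i 0 j 2 hu hk hi (by omega) hj (by omega)]
        simp [pvV1, pvCellAlt, e1, e2, e3 2 (by omega), e4 2 (by omega), pvPulse, hci]
    · -- pass-1 kind-3 value survives
      rw [pvG3, pvApply_notouch _ _ _ (by
        intro w hw he
        rcases pvW3_at (pvG2 Ap BA) Ap.length (pvK Ap) (pvI Ap) (pvJ Ap) u k i pix j 2 hp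
          (by omega) w hw he with ⟨_, hp0, _⟩
        omega)]
      rw [pvG2, pvApply_notouch _ _ _ (by
        intro w hw he
        rcases pvW2_at (pvG1 Ap BA) Ap.length (pvK Ap) (pvI Ap) (pvJ Ap) u k i pix j 2 hp
          (by omega) w hw he with ⟨hq1, _⟩ | ⟨hq3, _⟩ <;> omega)]
      rw [pvG1_char Ap BA u k i pix j 2 hu hk hi hp hj (by omega)]
      simp [pvV1, pvCellAlt, e1, e2, e3 2 (by omega), e4 2 (by omega), pvPulse, hc0]
  · -- q = 3
    rw [pvG3, pvApply_notouch _ _ _ (by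
      intro w hw he
      rcases pvW3_at (pvG2 Ap BA) Ap.length (pvK Ap) (pvI Ap) (pvJ Ap) u k i pix j 3 hp
        (by omega) w hw he with ⟨hq2, _⟩
      omega)]
    by_cases hcw : 1 < pix ∧ 1 ≤ i ∧ j + 1 < pvJ Ap
    · have hmem : ((u, k, 9*i+pix, 4*j+3), pvGt (pvG1 Ap BA) (u, k, 9*(i-1)+pix, 4*(j+1))) ∈
          pvW2 (pvG1 Ap BA) Ap.length (pvK Ap) (pvI Ap) (pvJ Ap) := by
        rw [pvW2_mem]
        refine ⟨u, hu, k, hk, i, ⟨hcw.2.1, by omega⟩, j, hj, pix, hp, ?_⟩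
        rw [pvW2pix_mem]
        exact Or.inr ⟨hcw.1, by omega, rfl⟩
      have hv := pvApply_mem (pvW2 (pvG1 Ap BA) Ap.length (pvK Ap) (pvI Ap) (pvJ Ap))
        (pvG1 Ap BA) _ (pvDims_G1 Ap BA) hmem hu hk (by dsimp; omega) (by dsimp; omega)
        (by
          intro w' hw' he
          rcases pvW2_at (pvG1 Ap BA) Ap.length (pvK Ap) (pvI Ap) (pvJ Ap) u k i pix j 3 hp
            (by omega) w' hw' (by simpa using he) with ⟨hq1, _⟩ | ⟨_, _, _, _, _, hv⟩
          · omega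
          · exact hv)
      dsimp only at hv
      rw [pvG2, hv]
      have h1 := pvG1_char Ap BA u k (i-1) pix (j+1) 0 hu hk (by omega) hp (by omega) (by omega)
      simp only [Nat.add_zero] at h1
      rw [h1]
      simp [pvV1, pvCellAlt, e1, e2, e3 3 (by omega), e4 3 (by omega), pvPulse, hcw, hcw.1]
    · rw [pvG2, pvApply_notouch _ _ _ (by
        intro w hw he
        rcases pvW2_at (pvG1 Ap BA) Ap.length (pvK Ap) (pvI Ap) (pvJ Ap) u k i pix j 3 hp
          (by omega) w hw he with ⟨hq1, _⟩ | ⟨_, h1', hi1, _, hjJ, _⟩ <;> omega)]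
      rw [pvG1_char Ap BA u k i pix j 3 hu hk hi hp hj (by omega)]
      simp [pvV1, pvCellAlt, e1, e2, e3 3 (by omega), e4 3 (by omega), pvPulse, hcw]

lemma pvGt_eq_getElem (g : List (List (List (List Int)))) (u k r c : Nat)
    (h1 : u < g.length) (h2 : k < g[u].length) (h3 : r < g[u][k].length)
    (h4 : c < g[u][k][r].length) : pvGt g (u, k, r, c) = g[u][k][r][c] := by
  unfold pvGt
  dsimp only
  rw [List.getD_eq_getElem _ _ h1, List.getD_eq_getElem _ _ h2,
    List.getD_eq_getElem _ _ h3, List.getD_eq_getElem _ _ h4]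

lemma pvMain (Ap : List (List (List (List Int)))) (BA : List Int) :
    IndiAssignPulses Ap BA = IndiAssignPulses_alt Ap BA := by
  rw [pvPortA_eq]
  have hd := pvDims_G3 Ap BA
  have halt : IndiAssignPulses_alt Ap BA = (List.range Ap.length).map (fun u =>
      (List.range (pvK Ap)).map (fun k => (List.range (pvI Ap * 9)).map (fun r =>
        (List.range (4 * pvJ Ap)).map (fun c =>
          pvCellAlt ((Ap.getD u []).getD k []) BA (pvI Ap) (pvJ Ap) r c)))) := rfl
  rw [halt]
  apply List.ext_getElem (by simp [hd.1])
  intro u hu1 hu2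
  have hdu := hd.2 _ (List.getElem_mem hu1)
  simp only [List.getElem_map, List.getElem_range]
  apply List.ext_getElem (by simp [hdu.1])
  intro k hk1 hk2
  have hdk := hdu.2 _ (List.getElem_mem hk1)
  simp only [List.getElem_map, List.getElem_range]
  apply List.ext_getElem (by simp [hdk.1])
  intro r hr1 hr2
  have hdr := hdk.2 _ (List.getElem_mem hr1)
  simp only [List.getElem_map, List.getElem_range]
  apply List.ext_getElem (by simp [hdr])
  intro c hc1 hc2
  simp only [List.getElem_map, List.getElem_range]
  have hu' : u < Ap.length := by
    have := hd.1
    omega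
  have hk' : k < pvK Ap := by
    have := hdu.1
    omega
  have hr' : r < pvI Ap * 9 := by
    have := hdk.1
    omega
  have hc' : c < 4 * pvJ Ap := by
    have := hdr
    omega
  have hchar := pvG3_char Ap BA u k (r/9) (r%9) (c/4) (c%4) hu' hk' (by omega) (by omega)
    (by omega) (by omega)
  have er : 9*(r/9) + r%9 = r := by omega
  have ec : 4*(c/4) + c%4 = c := by omega
  rw [er, ec] at hchar
  rw [← pvGt_eq_getElem (pvG3 Ap BA) u k r c hu1 hk1 hr1 hc1]
  exact hchar

-- ===== VERDICT (by name: the statement is the Claim_ definition above) =====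
theorem IndiAssignPulses_spec : Claim_equal_IndiAssignPulses := by
  intro Ap BA _ _
  unfold Spec_IndiAssignPulses
  exact pvMain Ap BA
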